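-- pv_equiv track=rewrite | github.com/8ly-dev/beginnings | beginnings/src/beginnings/migration/converters/django_converter.py | _transform_view_decorators
-- ===== SOURCE A (Python) =====
-- def _transform_view_decorators(content: str) -> str:
--     """Transform Django view decorators."""
--     decorator_mappings = {
--         '@login_required': '@auth_required',
--         '@csrf_exempt': '@csrf.exempt',
--         '@require_http_methods': '@app.route'
--     }
--
--     transformed = content
--     for django_decorator, beginnings_decorator in decorator_mappings.items():
--         transformed = transformed.replace(django_decorator, beginnings_decorator)
--
--     return transformed
-- ===== SOURCE B (Python) =====
-- def _transform_view_decorators(content: str) -> str: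
--     """Transform Django view decorators (single left-to-right scan)."""
--     out = []
--     i = 0
--     n = len(content)
--     while i < n:
--         if content.startswith('@login_required', i):
--             out.append('@auth_required')
--             i += 15
--         elif content.startswith('@csrf_exempt', i):
--             out.append('@csrf.exempt')
--             i += 12
--         elif content.startswith('@require_http_methods', i):
--             out.append('@app.route')
--             i += 21
--         else:
--             out.append(content[i])
--             i += 1
--     return ''.join(out)
-- ===== Notes on version B (the rewrite author's own statement) =====
-- stated objective: alternative
-- what changed: Replaces three sequential full-content str.replace passes by a single left-to-right scan that, at each position, emits the mapped decorator at the first matching key or copies the character.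
import Mathlib
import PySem

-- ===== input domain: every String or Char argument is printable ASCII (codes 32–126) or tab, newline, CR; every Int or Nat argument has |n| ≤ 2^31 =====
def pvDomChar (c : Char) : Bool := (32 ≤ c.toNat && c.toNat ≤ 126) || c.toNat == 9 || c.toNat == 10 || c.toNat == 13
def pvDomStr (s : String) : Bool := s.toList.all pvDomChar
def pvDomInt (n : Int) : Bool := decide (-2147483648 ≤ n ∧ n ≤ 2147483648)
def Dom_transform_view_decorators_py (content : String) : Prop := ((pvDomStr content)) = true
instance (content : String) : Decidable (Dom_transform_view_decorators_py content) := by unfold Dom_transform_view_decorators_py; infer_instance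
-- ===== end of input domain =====

-- B replaces A's three sequential full-string replace passes by a single left-to-right
-- scan emitting the mapped decorator at the first matching key (alternative algorithm).


-- ===== PORT A =====
def transform_view_decorators_py (content : String) : String :=
  let decorator_mappings : List (String × String) :=
    [("@login_required", "@auth_required"),
     ("@csrf_exempt", "@csrf.exempt"),
     ("@require_http_methods", "@app.route")]
  decorator_mappings.foldl
    (fun transformed p => PySem.Str.replace transformed p.1 p.2) content

-- ===== PORT B =====
-- B's scan over the remaining characters: first matching key is replaced, else copy one char.
def pvScanB : List Char → List Char
  | [] => []
  | c :: t =>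
    if ("@login_required".toList).isPrefixOf (c :: t) then
      "@auth_required".toList ++ pvScanB (t.drop 14)
    else if ("@csrf_exempt".toList).isPrefixOf (c :: t) then
      "@csrf.exempt".toList ++ pvScanB (t.drop 11)
    else if ("@require_http_methods".toList).isPrefixOf (c :: t) then
      "@app.route".toList ++ pvScanB (t.drop 20)
    else
      c :: pvScanB t
termination_by l => l.length
decreasing_by all_goals (simp [List.length_drop]; try omega)

def transform_view_decorators_py_alt (content : String) : String :=
  String.ofList (pvScanB content.toList)

-- ===== PRECONDITION & SPEC =====
def Spec_transform_view_decorators_py (content : String) (out : String) : Prop := out = transform_view_decorators_py_alt content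
instance (content : String) (out : String) : Decidable (Spec_transform_view_decorators_py content out) := by unfold Spec_transform_view_decorators_py; infer_instance

-- ===== CLAIM (what is proved, stated in full; the proofs are below) =====
def Claim_equal_transform_view_decorators_py : Prop := ∀ (content : String), Dom_transform_view_decorators_py content → Spec_transform_view_decorators_py content (transform_view_decorators_py content)

-- ===== LEMMAS AND PROOFS =====

-- A fuel-free model of Python's str.replace (agrees with PySem for nonempty `old`).
def pvRep (old new : List Char) : List Char → List Char
  | [] => []
  | c :: t =>
    if old.isPrefixOf (c :: t) then new ++ pvRep old new (t.drop (old.length - 1))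
    else c :: pvRep old new t
termination_by l => l.length
decreasing_by all_goals (simp [List.length_drop]; try omega)

theorem pvRep_go (old new : List Char) (hold : old ≠ []) :
    ∀ (fuel : Nat) (l acc : List Char), l.length ≤ fuel →
      PySem.Chars.replace.go old new fuel l acc = acc.reverse ++ pvRep old new l := by
  intro fuel
  induction fuel with
  | zero =>
    intro l acc h
    have hl : l = [] := by cases l <;> simp_all
    subst hl
    simp [PySem.Chars.replace.go, pvRep]
  | succ n ih =>
    intro l acc h
    cases l with
    | nil => simp [PySem.Chars.replace.go, pvRep]
    | cons c t =>
      rw [PySem.Chars.replace.go]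
      by_cases hp : old.isPrefixOf (c :: t)
      · rw [if_pos hp, pvRep, if_pos hp]
        have hdrop : (c :: t).drop old.length = t.drop (old.length - 1) := by
          cases old with
          | nil => exact absurd rfl hold
          | cons a o => simp
        rw [hdrop, ih _ _ (by simp at h ⊢; omega)]
        simp
      · rw [if_neg hp, pvRep, if_neg hp, ih _ _ (by simp at h ⊢; omega)]
        simp

theorem pvReplace_eq (old new l : List Char) (hold : old ≠ []) :
    PySem.Chars.replace l old new = pvRep old new l := by
  rw [PySem.Chars.replace, if_neg (by simp [List.isEmpty_iff, hold])]
  simpa using pvRep_go old new hold l.length l [] le_rfl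

-- "pvSafe old u": no occurrence of `old` can start inside `u` in `u ++ rest`.
def pvSafe (old u : List Char) : Prop :=
  ∀ (rest : List Char) (i : Nat), i < u.length → ¬ old <+: (u ++ rest).drop i

theorem pvSafe_of (old u : List Char)
    (hu2 : 2 ≤ u.length) (ho2 : 2 ≤ old.length)
    (hne : old[1]? ≠ u[1]?) (ho0 : old[0]? = some '@')
    (hat : ∀ i, i < u.length → 0 < i → u[i]? ≠ some '@') :
    pvSafe old u := by
  intro rest i hi hpre
  have key : ∀ j, j < old.length → (u ++ rest)[i + j]? = old[j]? := by
    intro j hj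
    have h := List.prefix_iff_getElem?.mp hpre j hj
    rw [List.getElem?_drop] at h
    rw [h, List.getElem?_eq_getElem hj]
  rcases Nat.eq_zero_or_pos i with hi0 | hip
  · subst hi0
    have h1 := key 1 (by omega)
    rw [Nat.zero_add, List.getElem?_append_left (by omega : 1 < u.length)] at h1
    exact hne h1.symm
  · have h0 := key 0 (by omega)
    rw [Nat.add_zero, List.getElem?_append_left hi] at h0
    exact hat i hi hip (h0.trans ho0)

theorem pvRep_append (old new u : List Char) (hs : pvSafe old u) :
    ∀ rest, pvRep old new (u ++ rest) = u ++ pvRep old new rest := by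
  induction u with
  | nil => intro rest; simp
  | cons c u' ih =>
    intro rest
    have hnp : ¬ old.isPrefixOf (c :: (u' ++ rest)) = true := by
      intro h
      exact hs rest 0 (by simp) (by simpa using List.isPrefixOf_iff_prefix.mp h)
    rw [List.cons_append, pvRep, if_neg hnp]
    have hs' : pvSafe old u' := by
      intro rest' i hi hpre
      exact hs rest' (i + 1) (by simpa using hi) (by simpa using hpre)
    rw [ih hs']
    rfl

theorem pvRep_match (old new rest : List Char) (hold : old ≠ []) :
    pvRep old new (old ++ rest) = new ++ pvRep old new rest := by
  cases old with
  | nil => exact absurd rfl hold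
  | cons a o =>
    rw [List.cons_append, pvRep,
        if_pos (List.isPrefixOf_iff_prefix.mpr (by simpa using List.prefix_append (a :: o) rest))]
    simp [List.drop_left']

-- '@'-free prefix transfer: a prefix of pvRep containing no '@' was already a prefix.
theorem pvRep_noAt_prefix (old new : List Char)
    (hn0 : new[0]? = some '@') :
    ∀ (s w : List Char), '@' ∉ w → w <+: pvRep old new s → w <+: s := by
  suffices H : ∀ (n : Nat) (s : List Char), s.length = n →
      ∀ w, '@' ∉ w → w <+: pvRep old new s → w <+: s by
    exact fun s w hw hp => H s.length s rfl w hw hp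
  intro n
  induction n using Nat.strong_induction_on with
  | _ n ih =>
    intro s hsn w hw hpre
    cases s with
    | nil => simpa [pvRep] using hpre
    | cons c t =>
      by_cases hp : old.isPrefixOf (c :: t) = true
      · rw [pvRep, if_pos hp] at hpre
        cases w with
        | nil => exact List.nil_prefix
        | cons a w' =>
          exfalso
          apply hw
          have hnew : 0 < new.length := by
            cases new with
            | nil => simp at hn0
            | cons b n' => simp
          have h0 := List.prefix_iff_getElem?.mp hpre 0 (by simp)
          rw [List.getElem?_append_left hnew, hn0] at h0
          have : a = '@' := by
            injection h0 with h
            exact h.symm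
          simp [this]
      · rw [pvRep, if_neg hp] at hpre
        cases w with
        | nil => exact List.nil_prefix
        | cons a w' =>
          rcases List.cons_prefix_cons.mp hpre with ⟨hac, hw'⟩
          subst hac
          have hwt : w' <+: t :=
            ih t.length (by simp [← hsn]) t rfl w'
              (fun h => hw (List.mem_cons_of_mem _ h)) hw'
          exact List.cons_prefix_cons.mpr ⟨rfl, hwt⟩

-- Shorthands for the three replace passes.
def pvR1 (l : List Char) : List Char := pvRep "@login_required".toList "@auth_required".toList l
def pvR2 (l : List Char) : List Char := pvRep "@csrf_exempt".toList "@csrf.exempt".toList l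
def pvR3 (l : List Char) : List Char := pvRep "@require_http_methods".toList "@app.route".toList l

-- The six concrete safety facts.
theorem pvSafe_k1_k2 : pvSafe "@login_required".toList "@csrf_exempt".toList :=
  pvSafe_of _ _ (by decide) (by decide) (by decide) (by decide) (by decide)
theorem pvSafe_k1_k3 : pvSafe "@login_required".toList "@require_http_methods".toList :=
  pvSafe_of _ _ (by decide) (by decide) (by decide) (by decide) (by decide)
theorem pvSafe_k2_k3 : pvSafe "@csrf_exempt".toList "@require_http_methods".toList :=
  pvSafe_of _ _ (by decide) (by decide) (by decide) (by decide) (by decide)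
theorem pvSafe_k2_v1 : pvSafe "@csrf_exempt".toList "@auth_required".toList :=
  pvSafe_of _ _ (by decide) (by decide) (by decide) (by decide) (by decide)
theorem pvSafe_k3_v1 : pvSafe "@require_http_methods".toList "@auth_required".toList :=
  pvSafe_of _ _ (by decide) (by decide) (by decide) (by decide) (by decide)
theorem pvSafe_k3_v2 : pvSafe "@require_http_methods".toList "@csrf.exempt".toList :=
  pvSafe_of _ _ (by decide) (by decide) (by decide) (by decide) (by decide)

-- The heart: one scan equals the three passes.
theorem pvScanB_eq : ∀ (s : List Char), pvScanB s = pvR3 (pvR2 (pvR1 s)) := by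
  suffices H : ∀ (n : Nat) (s : List Char), s.length = n → pvScanB s = pvR3 (pvR2 (pvR1 s)) by
    exact fun s => H s.length s rfl
  intro n
  induction n using Nat.strong_induction_on with
  | _ n ih =>
    intro s hsn
    cases s with
    | nil => simp [pvScanB, pvR1, pvR2, pvR3, pvRep]
    | cons c t =>
      by_cases h1 : ("@login_required".toList).isPrefixOf (c :: t) = true
      · -- l = k1 ++ rest
        rcases List.isPrefixOf_iff_prefix.mp h1 with ⟨rest, hrest⟩
        have hrt : t.drop 14 = rest := by
          have h := congrArg (List.drop 15) hrest
          simp at h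
          exact h.symm
        rw [pvScanB, if_pos h1, hrt]
        rw [pvR1, ← hrest, pvRep_match _ _ _ (by decide)]
        rw [pvR2, pvRep_append _ _ _ pvSafe_k2_v1]
        rw [pvR3, pvRep_append _ _ _ pvSafe_k3_v1]
        rw [ih rest.length (by rw [← hsn, ← hrest]; simp; omega) rest rfl]
        rfl
      · by_cases h2 : ("@csrf_exempt".toList).isPrefixOf (c :: t) = true
        · rcases List.isPrefixOf_iff_prefix.mp h2 with ⟨rest, hrest⟩
          have hrt : t.drop 11 = rest := by
            have h := congrArg (List.drop 12) hrest
            simp at h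
            exact h.symm
          rw [pvScanB, if_neg h1, if_pos h2, hrt]
          rw [pvR1, ← hrest, pvRep_append _ _ _ pvSafe_k1_k2]
          rw [pvR2, pvRep_match _ _ _ (by decide)]
          rw [pvR3, pvRep_append _ _ _ pvSafe_k3_v2]
          rw [ih rest.length (by rw [← hsn, ← hrest]; simp; omega) rest rfl]
          rfl
        · by_cases h3 : ("@require_http_methods".toList).isPrefixOf (c :: t) = true
          · rcases List.isPrefixOf_iff_prefix.mp h3 with ⟨rest, hrest⟩
            have hrt : t.drop 20 = rest := by
              have h := congrArg (List.drop 21) hrest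
              simp at h
              exact h.symm
            rw [pvScanB, if_neg h1, if_neg h2, if_pos h3, hrt]
            rw [pvR1, ← hrest, pvRep_append _ _ _ pvSafe_k1_k3]
            rw [pvR2, pvRep_append _ _ _ pvSafe_k2_k3]
            rw [pvR3, pvRep_match _ _ _ (by decide)]
            rw [ih rest.length (by rw [← hsn, ← hrest]; simp; omega) rest rfl]
            rfl
          · -- no key matches at this position
            rw [pvScanB, if_neg h1, if_neg h2, if_neg h3]
            have e1 : pvR1 (c :: t) = c :: pvR1 t := by
              rw [pvR1, pvRep, if_neg h1]; rfl
            have hk2 : ¬ ("@csrf_exempt".toList).isPrefixOf (c :: pvR1 t) = true := by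
              intro h
              have hpre := List.isPrefixOf_iff_prefix.mp h
              have hsplit : ("@csrf_exempt".toList) = '@' :: "csrf_exempt".toList := by decide
              rw [hsplit] at hpre
              rcases List.cons_prefix_cons.mp hpre with ⟨hc, htail⟩
              have : "csrf_exempt".toList <+: t :=
                pvRep_noAt_prefix _ _ (by decide) t _ (by decide) htail
              exact h2 (List.isPrefixOf_iff_prefix.mpr
                (by rw [hsplit]; exact List.cons_prefix_cons.mpr ⟨hc, this⟩))
            have e2 : pvR2 (c :: pvR1 t) = c :: pvR2 (pvR1 t) := by
              rw [pvR2, pvRep, if_neg hk2]; rfl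
            have hk3 : ¬ ("@require_http_methods".toList).isPrefixOf (c :: pvR2 (pvR1 t)) = true := by
              intro h
              have hpre := List.isPrefixOf_iff_prefix.mp h
              have hsplit : ("@require_http_methods".toList) = '@' :: "require_http_methods".toList := by decide
              rw [hsplit] at hpre
              rcases List.cons_prefix_cons.mp hpre with ⟨hc, htail⟩
              have s2 : "require_http_methods".toList <+: pvR1 t :=
                pvRep_noAt_prefix _ _ (by decide) (pvR1 t) _ (by decide) htail
              have s1 : "require_http_methods".toList <+: t :=
                pvRep_noAt_prefix _ _ (by decide) t _ (by decide) s2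
              exact h3 (List.isPrefixOf_iff_prefix.mpr
                (by rw [hsplit]; exact List.cons_prefix_cons.mpr ⟨hc, s1⟩))
            have e3 : pvR3 (c :: pvR2 (pvR1 t)) = c :: pvR3 (pvR2 (pvR1 t)) := by
              rw [pvR3, pvRep, if_neg hk3]; rfl
            rw [e1, e2, e3, ih t.length (by simp [← hsn]) t rfl]

-- ===== VERDICT (by name: the statement is the Claim_ definition above) =====
theorem transform_view_decorators_py_spec : Claim_equal_transform_view_decorators_py := by
  intro content _
  unfold Spec_transform_view_decorators_py transform_view_decorators_py transform_view_decorators_py_alt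
  simp only [List.foldl]
  rw [PySem.Str.replace, PySem.Str.replace, PySem.Str.replace]
  simp only [String.toList_ofList]
  rw [pvReplace_eq _ _ _ (by decide), pvReplace_eq _ _ _ (by decide),
      pvReplace_eq _ _ _ (by decide)]
  rw [pvScanB_eq]
  rfl
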